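-- pv_equiv track=rewrite | github.com/nishio/ai_project_manager | scripts/archive/parse_inbox.py | generate_task_id
-- ===== SOURCE A (Python) =====
-- from typing import Dict, List, Optional, Tuple
--
-- def generate_task_id(existing_tasks: List[Dict]) -> str:
--     """
--     Generate a unique task ID in TXXXX format.
--     Ensures uniqueness by checking existing IDs and finding the next available number.
--     """
--     used_numbers = {int(task['id'][1:]) for task in existing_tasks if task['id'].startswith('T')}
--     next_number = 0
--     while next_number < 10000:  # 4-digit limit
--         if next_number not in used_numbers:
--             return f"T{str(next_number).zfill(4)}"
--         next_number += 1
--     raise ValueError("All 4-digit task IDs (0000-9999) are in use")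
-- ===== SOURCE B (Python) =====
-- def generate_task_id(existing_tasks):
--     """Find first unused TXXXX id by one ordered pass over the sorted used numbers."""
--     nums = sorted(int(task['id'][1:]) for task in existing_tasks if task['id'].startswith('T'))
--     candidate = 0
--     for n in nums:
--         if n < candidate:
--             continue
--         if n == candidate:
--             candidate += 1
--         else:
--             break
--     if candidate < 10000:
--         return f"T{str(candidate).zfill(4)}"
--     raise ValueError("All 4-digit task IDs (0000-9999) are in use")
-- ===== Notes on version B (the rewrite author's own statement) =====
-- stated objective: alternative
-- what changed: A probes candidates 0,1,2,... against a set of used numbers until one is missing; B sorts the used numbers and finds the first gap (the mex) in a single ordered pass over the sorted list, with no membership probing.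
import Mathlib
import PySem

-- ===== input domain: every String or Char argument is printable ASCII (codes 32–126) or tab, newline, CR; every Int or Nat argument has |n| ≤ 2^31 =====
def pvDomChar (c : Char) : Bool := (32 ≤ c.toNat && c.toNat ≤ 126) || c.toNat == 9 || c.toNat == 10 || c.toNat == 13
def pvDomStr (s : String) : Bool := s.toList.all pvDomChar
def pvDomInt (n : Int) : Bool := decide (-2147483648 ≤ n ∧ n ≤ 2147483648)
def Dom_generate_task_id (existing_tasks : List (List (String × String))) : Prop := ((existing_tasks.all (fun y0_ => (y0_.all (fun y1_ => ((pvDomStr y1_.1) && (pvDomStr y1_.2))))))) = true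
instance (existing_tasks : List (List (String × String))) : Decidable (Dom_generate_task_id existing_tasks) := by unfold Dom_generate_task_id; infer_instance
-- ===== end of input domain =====

-- B replaces A's probe-every-candidate membership loop (0,1,2,… against a set) by
-- sorting the used numbers and finding the first gap in one ordered pass; same
-- extraction of numbers from the ids, no speed claim (objective: alternative).

-- shared extraction step, exactly Python's `task['id']` / startswith / `int(task['id'][1:])`:
-- outer none = the task raises (KeyError / ValueError); some none = id does not start with 'T'
def taskNum? (task : List (String × String)) : Option (Option Int) :=
  match (PySem.Dict.ofList task).get? "id" with
  | none => none
  | some s =>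
    if PySem.Str.startswith s "T" then
      match PySem.Int.ofStr? (PySem.Str.slice s (some 1) none) with
      | none => none
      | some n => some (some n)
    else some none

-- ===== PORT A =====
-- the set comprehension, left to right, accumulating a Python set
def aUsed (acc : PySem.Set Int) : List (List (String × String)) → Option (PySem.Set Int)
  | [] => some acc
  | t :: rest =>
    match taskNum? t with
    | none => none
    | some none => aUsed acc rest
    | some (some n) => aUsed (PySem.Set.add acc n) rest

-- the `while next_number < 10000` loop; fuel = 10000 - next_number; none = ValueError
def aLoop (used : PySem.Set Int) : Nat → Int → Option String
  | 0, _ => none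
  | fuel + 1, n =>
    if PySem.Set.contains used n then aLoop used fuel (n + 1)
    else some ("T" ++ PySem.Str.zfill (PySem.Int.toStr n) 4)

def generate_task_id (existing_tasks : List (List (String × String))) : String :=
  match aUsed PySem.Set.empty existing_tasks with
  | none => ""           -- KeyError / ValueError while building the set: outside Pre_
  | some used =>
    match aLoop used 10000 0 with
    | some s => s
    | none => ""         -- all 10000 ids in use: ValueError, outside Pre_

-- ===== PORT B =====
-- the generator inside sorted(...): the numbers in task order, as a list
def bNums : List (List (String × String)) → Option (List Int)
  | [] => some []
  | t :: rest =>
    match taskNum? t with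
    | none => none
    | some none => bNums rest
    | some (some n) =>
      match bNums rest with
      | none => none
      | some l => some (n :: l)

-- the ordered gap walk over the sorted numbers
def bWalk (c : Int) : List Int → Int
  | [] => c
  | n :: rest =>
    if n < c then bWalk c rest
    else if n = c then bWalk (c + 1) rest
    else c

def generate_task_id_alt (existing_tasks : List (List (String × String))) : String :=
  match bNums existing_tasks with
  | none => ""           -- same KeyError / ValueError: outside Pre_
  | some l =>
    let c := bWalk 0 (PySem.List.sorted l (fun x => x) false)
    if c < 10000 then "T" ++ PySem.Str.zfill (PySem.Int.toStr c) 4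
    else ""              -- ValueError, outside Pre_

-- ===== PRECONDITION & SPEC =====
-- Pre_ excludes exactly the inputs where A raises: a task without an 'id' key or with a
-- 'T…' id whose tail is not a Python int (KeyError/ValueError), and inputs whose ids
-- cover every number 0..9999 (A's explicit ValueError).
-- the numbers the ids carry (used by Pre_ only to say "not all of 0..9999 are used")
def usedNums (existing_tasks : List (List (String × String))) : List Int :=
  existing_tasks.filterMap (fun t => (taskNum? t).bind id)

def Pre_generate_task_id (existing_tasks : List (List (String × String))) : Prop :=
  (∀ t ∈ existing_tasks, (taskNum? t).isSome) ∧
  (PySem.List.dedup ((usedNums existing_tasks).filter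
    (fun n => decide (0 ≤ n) && decide (n < 10000)))).length < 10000
instance (existing_tasks : List (List (String × String))) : Decidable (Pre_generate_task_id existing_tasks) := by unfold Pre_generate_task_id; infer_instance

def pvWitness_generate_task_id : (List (List (String × String))) :=
  ([[("id", "T0000"), ("title", "a")], [("id", "T2")], [("id", "X9")]])

def Spec_generate_task_id (existing_tasks : List (List (String × String))) (out : String) : Prop := out = generate_task_id_alt existing_tasks
instance (existing_tasks : List (List (String × String))) (out : String) : Decidable (Spec_generate_task_id existing_tasks out) := by unfold Spec_generate_task_id; infer_instance

-- ===== CLAIM (what is proved, stated in full; the proofs are below) =====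
def Claim_equal_generate_task_id : Prop := ∀ (existing_tasks : List (List (String × String))), Dom_generate_task_id existing_tasks → Pre_generate_task_id existing_tasks → Spec_generate_task_id existing_tasks (generate_task_id existing_tasks)

-- ===== LEMMAS AND PROOFS =====

-- A's accumulated set is B's number list, folded in as a Python set.update
theorem aUsed_eq_bNums (ts : List (List (String × String))) (acc : PySem.Set Int) :
    aUsed acc ts = (bNums ts).map (PySem.Set.update acc) := by
  induction ts generalizing acc with
  | nil => rfl
  | cons t rest ih =>
    cases htn : taskNum? t with
    | none => simp [aUsed, bNums, htn]
    | some o =>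
      cases o with
      | none => simpa [aUsed, bNums, htn] using ih acc
      | some n =>
        have h1 : aUsed acc (t :: rest) = aUsed (PySem.Set.add acc n) rest := by
          simp [aUsed, htn]
        have h2 : bNums (t :: rest) =
            match bNums rest with | none => none | some l => some (n :: l) := by
          simp [bNums, htn]
        rw [h1, h2, ih (PySem.Set.add acc n)]
        cases bNums rest <;> rfl

-- when every task parses, bNums returns the list whose members are exactly the parsed numbers
theorem bNums_some (ts : List (List (String × String)))
    (h : ∀ t ∈ ts, (taskNum? t).isSome) :
    ∃ l, bNums ts = some l ∧ ∀ m : Int, m ∈ l ↔ ∃ t ∈ ts, taskNum? t = some (some m) := by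
  induction ts with
  | nil => exact ⟨[], rfl, by simp⟩
  | cons t rest ih =>
    obtain ⟨l, hl, hmem⟩ := ih (fun x hx => h x (List.mem_cons_of_mem _ hx))
    have ht := h t List.mem_cons_self
    cases htn : taskNum? t with
    | none => rw [htn] at ht; simp at ht
    | some o =>
      cases o with
      | none =>
        refine ⟨l, by simp [bNums, htn, hl], fun m => ?_⟩
        rw [hmem m]
        constructor
        · rintro ⟨x, hx, he⟩; exact ⟨x, List.mem_cons_of_mem _ hx, he⟩
        · rintro ⟨x, hx, he⟩
          rcases List.mem_cons.1 hx with rfl | hx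
          · rw [htn] at he; simp at he
          · exact ⟨x, hx, he⟩
      | some n =>
        refine ⟨n :: l, by simp [bNums, htn, hl], fun m => ?_⟩
        simp only [List.mem_cons, hmem m]
        constructor
        · rintro (rfl | ⟨x, hx, he⟩)
          · exact ⟨t, Or.inl rfl, htn⟩
          · exact ⟨x, Or.inr hx, he⟩
        · rintro ⟨x, hx, he⟩
          rcases hx with rfl | hx
          · rw [htn] at he; simp at he; exact Or.inl he.symm
          · right; exact ⟨x, hx, he⟩

-- the first-free characterisation both programs compute
def IsMex (l : List Int) (m : Int) : Prop :=
  0 ≤ m ∧ m ∉ l ∧ ∀ k : Int, 0 ≤ k → k < m → k ∈ l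

theorem isMex_unique {l : List Int} {m₁ m₂ : Int} (h₁ : IsMex l m₁) (h₂ : IsMex l m₂) :
    m₁ = m₂ := by
  rcases h₁ with ⟨h₁0, h₁n, h₁a⟩
  rcases h₂ with ⟨h₂0, h₂n, h₂a⟩
  by_contra hne
  rcases lt_or_gt_of_ne hne with h | h
  · exact h₁n (h₂a m₁ h₁0 h)
  · exact h₂n (h₁a m₂ h₂0 h)

-- A's while loop: characterisation of the value it returns
theorem aLoop_spec (used : PySem.Set Int) :
    ∀ (fuel : Nat) (n : Int), 0 ≤ n →
    (∀ k : Int, 0 ≤ k → k < n → PySem.Set.contains used k = true) →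
    (∃ m : Int, n ≤ m ∧ m < n + fuel ∧ PySem.Set.contains used m = false) →
    ∃ m : Int, aLoop used fuel n = some ("T" ++ PySem.Str.zfill (PySem.Int.toStr m) 4) ∧
      0 ≤ m ∧ PySem.Set.contains used m = false ∧
      ∀ k : Int, 0 ≤ k → k < m → PySem.Set.contains used k = true := by
  intro fuel
  induction fuel with
  | zero => intro n _ _ hex; rcases hex with ⟨m, h1, h2, _⟩; omega
  | succ f ih =>
    intro n hn hbelow hex
    by_cases hc : PySem.Set.contains used n = true
    · have hex' : ∃ m : Int, n + 1 ≤ m ∧ m < (n + 1) + f ∧ PySem.Set.contains used m = false := by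
        rcases hex with ⟨m, h1, h2, h3⟩
        refine ⟨m, ?_, by omega, h3⟩
        rcases eq_or_lt_of_le h1 with rfl | h
        · rw [hc] at h3; simp at h3
        · omega
      obtain ⟨m, hm1, hm2⟩ := ih (n + 1) (by omega)
        (fun k hk hk' => by
          rcases eq_or_lt_of_le (by omega : k ≤ n) with rfl | h
          · exact hc
          · exact hbelow k hk (by omega)) hex'
      have hstep : aLoop used (f + 1) n =
          if PySem.Set.contains used n then aLoop used f (n + 1)
          else some ("T" ++ PySem.Str.zfill (PySem.Int.toStr n) 4) := rfl
      exact ⟨m, by rw [hstep, if_pos hc]; exact hm1, hm2⟩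
    · have hstep : aLoop used (f + 1) n =
          if PySem.Set.contains used n then aLoop used f (n + 1)
          else some ("T" ++ PySem.Str.zfill (PySem.Int.toStr n) 4) := rfl
      refine ⟨n, ?_, hn, by simpa using hc, hbelow⟩
      rw [hstep, if_neg hc]

-- B's gap walk on a sorted list
theorem bWalk_spec (s : List Int) (hs : s.Pairwise (· ≤ ·)) :
    ∀ c : Int, c ≤ bWalk c s ∧ bWalk c s ∉ s ∧
      ∀ k : Int, c ≤ k → k < bWalk c s → k ∈ s := by
  induction s with
  | nil => intro c; exact ⟨le_refl c, by simp, fun k h1 h2 => by simp [bWalk] at h2; omega⟩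
  | cons n rest ih =>
    rcases List.pairwise_cons.1 hs with ⟨hall, hrest⟩
    intro c
    by_cases h1 : n < c
    · obtain ⟨ha, hb, hc⟩ := ih hrest c
      refine ⟨by simpa [bWalk, h1] using ha, ?_, ?_⟩
      · simp only [bWalk, if_pos h1, List.mem_cons]
        rintro (rfl | hm)
        · omega
        · exact hb hm
      · intro k hk1 hk2
        rw [bWalk, if_pos h1] at hk2
        exact List.mem_cons_of_mem _ (hc k hk1 hk2)
    · by_cases h2 : n = c
      · obtain ⟨ha, hb, hc⟩ := ih hrest (c + 1)
        have hstep : bWalk c (n :: rest) =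
            if n < c then bWalk c rest else if n = c then bWalk (c + 1) rest else c := rfl
        have hw : bWalk c (n :: rest) = bWalk (c + 1) rest := by
          rw [hstep, if_neg h1, if_pos h2]
        refine ⟨by omega, ?_, ?_⟩
        · rw [hw]; simp only [List.mem_cons]
          rintro (he | hm)
          · omega
          · exact hb hm
        · intro k hk1 hk2
          rw [hw] at hk2
          rcases eq_or_lt_of_le hk1 with rfl | hk
          · exact List.mem_cons.2 (Or.inl h2.symm)
          · exact List.mem_cons_of_mem _ (hc k (by omega) hk2)
      · have hstep : bWalk c (n :: rest) =
            if n < c then bWalk c rest else if n = c then bWalk (c + 1) rest else c := rfl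
        have hw : bWalk c (n :: rest) = c := by rw [hstep, if_neg h1, if_neg h2]
        refine ⟨le_of_eq hw.symm, ?_, fun k hk1 hk2 => by omega⟩
        rw [hw]; simp only [List.mem_cons]
        rintro (rfl | hm)
        · exact h2 rfl
        · exact absurd (hall _ hm) (by omega)

-- pigeonhole: fewer than 10000 distinct used numbers in [0,10000) leaves one free
set_option maxRecDepth 100000 in
theorem exists_free (L : List Int)
    (h : (PySem.List.dedup (L.filter (fun n => decide (0 ≤ n) && decide (n < 10000)))).length < 10000) :
    ∃ n : Int, 0 ≤ n ∧ n < 10000 ∧ n ∉ L := by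
  by_contra hall
  push Not at hall
  set u := PySem.List.dedup (L.filter (fun n => decide (0 ≤ n) && decide (n < 10000))) with hu
  have hcard : (Finset.range 10000).card ≤ u.toFinset.card := by
    refine Finset.card_le_card_of_injOn (fun k : Nat => (k : Int)) ?_ ?_
    · intro k hk
      simp only [Finset.coe_range, Set.mem_Iio] at hk
      simp only [List.coe_toFinset, Set.mem_setOf_eq]
      rw [hu, PySem.List.mem_dedup, List.mem_filter]
      refine ⟨hall (k : Int) (by positivity) (by exact_mod_cast hk), by simp; omega⟩
    · intro a _ b _ hab
      simpa using hab
  have : u.toFinset.card ≤ u.length := List.toFinset_card_le u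
  rw [Finset.card_range] at hcard
  omega

-- ===== VERDICT (by name: the statement is the Claim_ definition above) =====
theorem generate_task_id_spec : Claim_equal_generate_task_id := by
  intro ts _ hpre
  rcases hpre with ⟨hok, hcnt⟩
  obtain ⟨l, hl, hmem⟩ := bNums_some ts hok
  -- l has the same members as usedNums ts
  have hmemU : ∀ m : Int, m ∈ l ↔ m ∈ usedNums ts := by
    intro m
    rw [hmem m, usedNums, List.mem_filterMap]
    constructor
    · rintro ⟨t, ht, he⟩; exact ⟨t, ht, by rw [he]; rfl⟩
    · rintro ⟨t, ht, he⟩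
      refine ⟨t, ht, ?_⟩
      cases htn : taskNum? t with
      | none => rw [htn] at he; simp at he
      | some o =>
        cases o with
        | none => rw [htn] at he; simp at he
        | some k => rw [htn] at he; simp at he; rw [he]
  obtain ⟨n0, hn00, hn0lt, hn0u⟩ := exists_free (usedNums ts) hcnt
  have hn0l : (n0 : Int) ∉ l := fun hm => hn0u ((hmemU n0).1 hm)
  -- A side
  unfold Spec_generate_task_id generate_task_id generate_task_id_alt
  rw [aUsed_eq_bNums, hl]
  simp only [Option.map_some]
  have hcontains : ∀ m : Int, PySem.Set.contains (PySem.Set.update PySem.Set.empty l) m = true ↔ m ∈ l := by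
    intro m
    rw [PySem.Set.contains_iff, PySem.Set.mem_update]
    simp [PySem.Set.empty]
  obtain ⟨mA, hAeq, hA0, hAfree, hAbelow⟩ := aLoop_spec (PySem.Set.update PySem.Set.empty l) 10000 0
    (le_refl 0) (fun k hk hk' => by omega)
    ⟨n0, by omega, by push_cast; omega,
      by rw [← Bool.not_eq_true, hcontains]; exact hn0l⟩
  rw [hAeq]
  -- B side
  set s := PySem.List.sorted l (fun x => x) false with hsdef
  have hmemS : ∀ m : Int, m ∈ s ↔ m ∈ l := fun m => PySem.List.mem_sorted l (fun x => x) false m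
  obtain ⟨hB1, hB2, hB3⟩ := bWalk_spec s (PySem.List.sorted_pairwise l (fun x => x)) 0
  -- both are the mex of l
  have hmexA : IsMex l mA := by
    refine ⟨hA0, ?_, fun k hk hk' => (hcontains k).1 (hAbelow k hk hk')⟩
    rw [← hcontains mA, hAfree]; simp
  have hmexB : IsMex l (bWalk 0 s) := by
    refine ⟨hB1, fun hm => hB2 ((hmemS _).2 hm), fun k hk hk' => (hmemS k).1 (hB3 k hk hk')⟩
  have heq : mA = bWalk 0 s := isMex_unique hmexA hmexB
  -- B's candidate is below 10000 (minimality against n0)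
  have hlt : bWalk 0 s < 10000 := by
    have : bWalk 0 s ≤ n0 := by
      by_contra h
      exact hn0l ((hmemS _).1 (hB3 n0 (by omega) (by omega)))
    omega
  rw [if_pos hlt, heq]
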